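-- pv_equiv track=rewrite | github.com/rave1sking/Multi-objective-optimization | dynamicBinPacking_V1.py | map_individual
-- ===== SOURCE A (Python) =====
-- def map_individual(individual):
--     box_mapping = {}
--     new_individual = individual
--
--     # 遍历个体列表中的每个值
--     for idx, value in enumerate(individual):
--         # 如果值尚未分配新编号，则将其添加到字典中，并将当前字典长度作为新编号
--         if value not in box_mapping:
--             box_mapping[value] = len(box_mapping)
--         # 将新编号添加到新结果列表中
--         new_individual[idx] = box_mapping[value]
--     return new_individual
-- ===== SOURCE B (Python) =====
-- def map_individual(individual):
--     # Dict-free rank counting: the canonical label of a value is the number of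
--     # first occurrences strictly before its own first occurrence. Uses index
--     # scans over a snapshot instead of A's hash map. Mutates in place and
--     # returns the same list object, like A.
--     orig = individual[:]
--     firsts = [j for j in range(len(orig)) if orig.index(orig[j]) == j]
--     for i in range(len(individual)):
--         f = orig.index(orig[i])
--         individual[i] = sum(1 for j in firsts if j < f)
--     return individual
-- ===== Notes on version B (the rewrite author's own statement) =====
-- stated objective: alternative
-- what changed: A builds a value-to-label hash map incrementally while relabelling; B uses no map at all: it relabels each position by counting, with nested list.index scans, how many first occurrences precede that value's own first occurrence.
import Mathlib
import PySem

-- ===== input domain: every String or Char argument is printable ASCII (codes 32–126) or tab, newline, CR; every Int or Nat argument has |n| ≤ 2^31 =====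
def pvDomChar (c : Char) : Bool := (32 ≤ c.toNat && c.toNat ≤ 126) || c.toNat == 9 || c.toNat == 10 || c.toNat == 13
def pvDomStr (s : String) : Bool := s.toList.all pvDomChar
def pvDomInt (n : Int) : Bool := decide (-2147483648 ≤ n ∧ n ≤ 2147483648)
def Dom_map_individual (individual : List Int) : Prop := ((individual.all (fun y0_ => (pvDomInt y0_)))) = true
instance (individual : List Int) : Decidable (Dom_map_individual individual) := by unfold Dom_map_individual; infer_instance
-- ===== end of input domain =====

-- B replaces A's incremental hash-map relabelling by a dict-free counting rule:
-- each value's label is the number of first occurrences strictly before its own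
-- first occurrence, found by nested list.index scans (alternative algorithm, slower).
-- Both A and B mutate `individual` in place and return the same object; the
-- equivalence proved here is about the returned value.


-- ===== PORT A =====
-- `new_individual = individual` aliases, and each index is read (by enumerate)
-- before it is overwritten, so enumerating the original snapshot is exact.
def map_individual (individual : List Int) : List Int :=
  let box_mapping : PySem.Dict Int Int := PySem.Dict.empty
  let new_individual := individual
  let res := (PySem.List.enumerate individual).foldl (fun st p =>
    let bm := if st.1.contains p.2 then st.1 else st.1.insert p.2 st.1.size
    (bm, PySem.List.pySetD st.2 p.1 (bm.getD p.2 0))) (box_mapping, new_individual)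
  res.2

-- ===== PORT B =====
-- `orig = individual[:]` snapshots the list; all reads are from `orig`, with
-- each `individual[i]` written exactly once, so the result is a map over orig.
-- `orig.index(v)` always succeeds (v ∈ orig), hence `.getD 0`; `range(len(orig))`
-- and `range(f)` have nonnegative bounds, so `List.range` is exact.
def map_individual_alt (individual : List Int) : List Int :=
  let orig := individual
  let firsts := (List.range orig.length).filter (fun (j : Nat) =>
    PySem.List.index? orig ((PySem.List.pyGet? orig (j : Int)).getD 0) == some j)
  orig.map (fun v =>
    let f := (PySem.List.index? orig v).getD 0
    firsts.foldl (fun acc (j : Nat) => if j < f then acc + 1 else acc) (0 : Int))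

-- ===== PRECONDITION & SPEC =====
def Spec_map_individual (individual : List Int) (out : List Int) : Prop := out = map_individual_alt individual
instance (individual : List Int) (out : List Int) : Decidable (Spec_map_individual individual out) := by unfold Spec_map_individual; infer_instance

-- ===== CLAIM (what is proved, stated in full; the proofs are below) =====
def Claim_equal_map_individual : Prop := ∀ (individual : List Int), Dom_map_individual individual → Spec_map_individual individual (map_individual individual)

-- ===== LEMMAS AND PROOFS =====

-- reference relabelling: u = distinct values seen so far, in first-seen order
def pvRelabel (u : List Int) : List Int → List Int
  | [] => []
  | v :: rest =>
    if v ∈ u then (u.idxOf v : Int) :: pvRelabel u rest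
    else (u.length : Int) :: pvRelabel (u ++ [v]) rest

-- seen-set after also scanning xs
def pvDedupFrom (u : List Int) (xs : List Int) : List Int :=
  xs.foldl PySem.Set.add u

lemma pvDedupFrom_cons (u : List Int) (v : Int) (xs : List Int) :
    pvDedupFrom u (v :: xs) = pvDedupFrom (PySem.Set.add u v) xs := rfl

lemma pvSet_add_mem (u : List Int) (v : Int) (h : v ∈ u) : PySem.Set.add u v = u := by
  simp [PySem.Set.add, PySem.Set.contains, h]

lemma pvSet_add_not_mem (u : List Int) (v : Int) (h : v ∉ u) :
    PySem.Set.add u v = u ++ [v] := by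
  simp [PySem.Set.add, PySem.Set.contains, h]

lemma pvDedupFrom_append (u xs : List Int) : ∃ t, pvDedupFrom u xs = u ++ t := by
  induction xs generalizing u with
  | nil => exact ⟨[], by simp [pvDedupFrom]⟩
  | cons v xs ih =>
    rw [pvDedupFrom_cons]
    by_cases h : v ∈ u
    · rw [pvSet_add_mem u v h]; exact ih u
    · rw [pvSet_add_not_mem u v h]
      obtain ⟨t, ht⟩ := ih (u ++ [v])
      exact ⟨v :: t, by simp [ht]⟩

lemma pvIdxOf_dedupFrom (u xs : List Int) (v : Int) (h : v ∈ u) :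
    (pvDedupFrom u xs).idxOf v = u.idxOf v := by
  obtain ⟨t, ht⟩ := pvDedupFrom_append u xs
  rw [ht, List.idxOf_append_of_mem h]

-- relabelling = looking every element up in the final seen-set
lemma pvRelabel_eq_map (xs u : List Int) :
    pvRelabel u xs = xs.map (fun v => ((pvDedupFrom u xs).idxOf v : Int)) := by
  induction xs generalizing u with
  | nil => rfl
  | cons v xs ih =>
    rw [pvDedupFrom_cons]
    by_cases h : v ∈ u
    · rw [pvSet_add_mem u v h]
      simp only [pvRelabel, h, if_true, List.map_cons, ih]
      rw [pvIdxOf_dedupFrom u xs v h]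
    · rw [pvSet_add_not_mem u v h]
      simp only [pvRelabel, h, if_false, List.map_cons, ih]
      rw [pvIdxOf_dedupFrom (u ++ [v]) xs v (by simp),
        List.idxOf_append_of_notMem h]
      simp

lemma pvTakeSet (cur : List Int) (s : Nat) (k : Int) (h : s < cur.length) :
    (cur.set s k).take (s + 1) = cur.take s ++ [k] := by
  rw [List.set_eq_take_cons_drop _ h, List.take_append,
    List.take_of_length_le (l := cur.take s) (by simp)]
  have h1 : s + 1 - (cur.take s).length = 1 := by simp; omega
  rw [h1]
  simp

-- A's fold, under the invariant that d encodes u, writes pvRelabel u xs over cur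
lemma pvFoldA (xs : List Int) (s : Nat) (d : PySem.Dict Int Int) (cur u : List Int)
    (hu : u.Nodup) (hkeys : d.keys = u)
    (hget : ∀ v ∈ u, d.getD v 0 = (u.idxOf v : Int))
    (hlen : cur.length = s + xs.length) :
    ((PySem.List.enumerate xs (s : Int)).foldl (fun st p =>
      let bm := if st.1.contains p.2 then st.1 else st.1.insert p.2 st.1.size
      (bm, PySem.List.pySetD st.2 p.1 (bm.getD p.2 0))) (d, cur)).2
      = cur.take s ++ pvRelabel u xs := by
  induction xs generalizing s d cur u with
  | nil =>
    simp only [PySem.List.enumerate_nil, List.foldl_nil, pvRelabel, List.append_nil]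
    rw [List.take_of_length_le (by simp at hlen; omega)]
  | cons v xs ih =>
    rw [PySem.List.enumerate_cons]
    have hcont : d.contains v = decide (v ∈ u) := by
      rw [PySem.Dict.contains_eq_decide_mem_keys, hkeys]
    have hsize : d.size = u.length := by
      have : d.keys.length = u.length := by rw [hkeys]
      simpa [PySem.Dict.keys] using this
    have hslt : s < cur.length := by simp at hlen; omega
    by_cases hv : v ∈ u
    · simp only [List.foldl_cons, hcont, hv, decide_true, if_true]
      have hw : PySem.List.pySetD cur (s : Int) (d.getD v 0) =
          cur.set s (d.getD v 0) := by
        simp [PySem.List.pySetD_natCast]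
      have hcast : ((s : Int) + 1) = ((s + 1 : Nat) : Int) := by push_cast; ring
      rw [hw, hcast, ih (s + 1) d (cur.set s (d.getD v 0)) u hu hkeys hget
        (by simp at hlen ⊢; omega)]
      rw [pvTakeSet cur s _ hslt, hget v hv]
      simp [pvRelabel, hv]
    · simp only [List.foldl_cons, hcont, hv, decide_false, Bool.false_eq_true, if_false]
      have hnc : d.contains v = false := by
        rw [hcont]; simp [hv]
      have hkeys' : (d.insert v d.size).keys = u ++ [v] := by
        rw [PySem.Dict.keys_insert_of_not_contains _ _ hnc, hkeys]
      have hget' : ∀ w ∈ u ++ [v],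
          (d.insert v d.size).getD w 0 = ((u ++ [v]).idxOf w : Int) := by
        intro w hw
        rcases List.mem_append.mp hw with hwu | hwv
        · have hne : w ≠ v := fun h => hv (h ▸ hwu)
          rw [PySem.Dict.getD_insert_of_ne _ _ _ hne, hget w hwu,
            List.idxOf_append_of_mem hwu]
        · have hwv : w = v := by simpa using hwv
          subst hwv
          rw [PySem.Dict.getD_insert_self, hsize, List.idxOf_append_of_notMem hv]
          simp
      have hu' : (u ++ [v]).Nodup :=
        hu.append (List.nodup_singleton v) (by simpa using hv)
      have hgv : (d.insert v d.size).getD v 0 = (u.length : Int) := by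
        rw [PySem.Dict.getD_insert_self, hsize]
      have hw : PySem.List.pySetD cur (s : Int) ((d.insert v d.size).getD v 0) =
          cur.set s (u.length : Int) := by
        rw [hgv]; simp [PySem.List.pySetD_natCast]
      have hcast : ((s : Int) + 1) = ((s + 1 : Nat) : Int) := by push_cast; ring
      rw [hw, hcast, ih (s + 1) (d.insert v d.size) (cur.set s (u.length : Int))
        (u ++ [v]) hu' hkeys' hget' (by simp at hlen ⊢; omega)]
      rw [pvTakeSet cur s _ hslt]
      simp [pvRelabel, hv]

-- ===== B-side lemmas =====

-- the filter predicate of B's `firsts`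
def pvIsFirst (xs : List Int) (j : Nat) : Bool :=
  PySem.List.index? xs ((PySem.List.pyGet? xs (j : Int)).getD 0) == some j

-- element f of xs is a first occurrence iff index? finds it at f
lemma pvIndexEqIff (xs : List Int) (f : Nat) (hf : f < xs.length) :
    PySem.List.index? xs xs[f] = some f ↔ xs[f] ∉ xs.take f := by
  constructor
  · intro h hmem
    obtain ⟨hk, _, hne⟩ := PySem.List.getElem_of_index?_eq_some h
    obtain ⟨i, hi, hxi⟩ := List.mem_iff_getElem.mp hmem
    have hif : i < f := by simpa using hi.trans_le (by simp)
    exact hne i hif (by rw [← hxi]; simp [List.getElem_take])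
  · intro hnm
    rw [PySem.List.index?_eq_some_iff]
    exact ⟨xs.take f, xs.drop (f + 1),
      by rw [← List.drop_eq_getElem_cons hf, List.take_append_drop],
      by simp [Nat.le_of_lt hf], hnm⟩

-- counting first occurrences below f = size of the distinct set of the prefix
lemma pvCountPrefix (xs : List Int) (f : Nat) (hf : f ≤ xs.length) :
    (List.range f).countP (pvIsFirst xs) = (PySem.Set.ofList (xs.take f)).length := by
  induction f with
  | zero => simp
  | succ f ih =>
    have hflt : f < xs.length := by omega
    have hget : (PySem.List.pyGet? xs (f : Int)).getD 0 = xs[f] := by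
      simp [PySem.List.pyGet?_natCast, List.getElem?_eq_getElem hflt]
    have htake : xs.take (f + 1) = xs.take f ++ [xs[f]] := by
      rw [List.take_add_one, List.getElem?_eq_getElem hflt]; rfl
    have hofl : PySem.Set.ofList (xs.take (f + 1))
        = PySem.Set.add (PySem.Set.ofList (xs.take f)) xs[f] := by
      rw [htake, PySem.Set.ofList_eq_foldl, List.foldl_append]
      rfl
    rw [List.range_succ, List.countP_append, ih (by omega), hofl]
    by_cases hmem : xs[f] ∈ xs.take f
    · have hcond : ¬ PySem.List.index? xs xs[f] = some f := by
        rw [pvIndexEqIff xs f hflt]; simpa using hmem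
      have hin : xs[f] ∈ PySem.Set.ofList (xs.take f) := by
        simpa [PySem.Set.mem_ofList] using hmem
      have h1 : pvIsFirst xs f = false := by
        unfold pvIsFirst; rw [hget]; simpa using hcond
      rw [pvSet_add_mem _ _ hin]
      simp [h1]
    · have hcond : PySem.List.index? xs xs[f] = some f :=
        (pvIndexEqIff xs f hflt).mpr hmem
      have hnin : xs[f] ∉ PySem.Set.ofList (xs.take f) := by
        simpa [PySem.Set.mem_ofList] using hmem
      have h1 : pvIsFirst xs f = true := by
        unfold pvIsFirst; rw [hget]; simpa using hcond
      rw [pvSet_add_not_mem _ _ hnin]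
      simp [h1]

-- B's sum over firsts counts with acc, as the loop does
lemma pvFoldCount (l : List Nat) (f : Nat) (acc : Int) :
    l.foldl (fun acc (j : Nat) => if j < f then acc + 1 else acc) acc
      = acc + (l.countP (fun j => decide (j < f)) : Int) := by
  induction l generalizing acc with
  | nil => simp
  | cons a l ih =>
    rw [List.foldl_cons, ih, List.countP_cons]
    by_cases h : a < f
    · simp [h]; ring
    · simp [h]

-- restricting the filtered firsts to indices below f ≤ n gives the prefix count
lemma pvCountFilter (xs : List Int) (f n : Nat) (hfn : f ≤ n) :
    ((List.range n).filter (pvIsFirst xs)).countP (fun j => decide (j < f))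
      = (List.range f).countP (pvIsFirst xs) := by
  induction n with
  | zero =>
    have : f = 0 := by omega
    simp [this]
  | succ n ih =>
    by_cases hf : f ≤ n
    · rw [List.range_succ, List.filter_append, List.countP_append, ih hf]
      have : (List.filter (pvIsFirst xs) [n]).countP (fun j => decide (j < f)) = 0 := by
        by_cases h : pvIsFirst xs n <;> simp [List.filter, h]
        omega
      omega
    · have hfe : f = n + 1 := by omega
      subst hfe
      rw [List.countP_eq_length.mpr, ← List.countP_eq_length_filter]
      intro a ha
      have : a ∈ List.range (n + 1) := List.mem_of_mem_filter ha
      simp at this ⊢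
      omega

-- position of v in the final dedup list = distinct count of the prefix
-- before v's first occurrence
lemma pvIdxOfDedup (xs : List Int) (f : Nat) (v : Int)
    (h : PySem.List.index? xs v = some f) :
    (pvDedupFrom [] xs).idxOf v = (PySem.Set.ofList (xs.take f)).length := by
  obtain ⟨hk, hxf, _⟩ := PySem.List.getElem_of_index?_eq_some h
  have hnm : v ∉ xs.take f := by
    rw [← hxf]; exact (pvIndexEqIff xs f hk).mp (hxf ▸ h)
  have hnin : v ∉ PySem.Set.ofList (xs.take f) := by
    simpa [PySem.Set.mem_ofList] using hnm
  have hsplit : xs = xs.take f ++ v :: xs.drop (f + 1) := by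
    rw [← hxf, ← List.drop_eq_getElem_cons hk, List.take_append_drop]
  have hded : pvDedupFrom [] xs
      = pvDedupFrom (PySem.Set.ofList (xs.take f) ++ [v]) (xs.drop (f + 1)) := by
    conv_lhs => rw [hsplit]
    rw [show pvDedupFrom [] (xs.take f ++ v :: xs.drop (f + 1))
        = pvDedupFrom (pvDedupFrom [] (xs.take f)) (v :: xs.drop (f + 1)) from
      by simp [pvDedupFrom, List.foldl_append]]
    rw [show pvDedupFrom [] (xs.take f) = PySem.Set.ofList (xs.take f) from
      by rw [PySem.Set.ofList_eq_foldl]; rfl]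
    rw [pvDedupFrom_cons, pvSet_add_not_mem _ _ hnin]
  obtain ⟨t, ht⟩ := pvDedupFrom_append (PySem.Set.ofList (xs.take f) ++ [v]) (xs.drop (f + 1))
  rw [hded, ht, List.append_assoc, List.idxOf_append_of_notMem hnin]
  simp

-- ===== VERDICT (by name: the statement is the Claim_ definition above) =====
theorem map_individual_spec : Claim_equal_map_individual := by
  intro individual _
  unfold Spec_map_individual map_individual map_individual_alt
  have hA := pvFoldA individual 0 PySem.Dict.empty individual [] List.nodup_nil
    (by simp) (by simp) (by simp)
  simp only [Int.natCast_zero] at hA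
  simp only [hA, List.take_zero, List.nil_append]
  rw [pvRelabel_eq_map]
  apply List.map_congr_left
  intro v hv
  obtain ⟨f, hf⟩ : ∃ f, PySem.List.index? individual v = some f := by
    cases h : PySem.List.index? individual v with
    | none => exact absurd ((PySem.List.index?_eq_none_iff _ _).mp h) (by simpa using hv)
    | some f => exact ⟨f, rfl⟩
  obtain ⟨hk, _, _⟩ := PySem.List.getElem_of_index?_eq_some hf
  simp only [hf, Option.getD_some]
  rw [show (fun (j : Nat) => PySem.List.index? individual
        ((PySem.List.pyGet? individual (j : Int)).getD 0) == some j) = pvIsFirst individual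
      from rfl,
    pvFoldCount, pvCountFilter individual f individual.length (Nat.le_of_lt hk),
    pvCountPrefix individual f (Nat.le_of_lt hk), pvIdxOfDedup individual f v hf]
  simp
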